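-- pv_equiv track=rewrite | github.com/District47/SkyWatch | skywatch/aprs/tx.py | compute_passcode
-- ===== SOURCE A (Python) =====
-- def compute_passcode(callsign: str) -> int:
--     """APRS-IS passcode for a callsign (no SSID). Returns 0..32767."""
--     cs = callsign.upper().split("-")[0]
--     code = 0x73E2
--     i = 0
--     while i + 1 < len(cs):
--         code ^= (ord(cs[i]) << 8) | ord(cs[i + 1])
--         i += 2
--     if i < len(cs):
--         code ^= ord(cs[i]) << 8
--     return code & 0x7FFF
-- ===== SOURCE B (Python) =====
-- def compute_passcode(callsign: str) -> int:
--     """APRS-IS passcode for a callsign (no SSID). Returns 0..32767."""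
--     cs = callsign.upper().split("-")[0]
--     code = 0x73E2
--     for idx, ch in enumerate(cs):
--         if idx % 2 == 0:
--             code ^= ord(ch) << 8
--         else:
--             code ^= ord(ch)
--     return code & 0x7FFF
-- ===== Notes on version B (the rewrite author's own statement) =====
-- stated objective: idiomatic
-- what changed: Replaces the index-based while loop that consumes characters two at a time (with a separate trailing-odd-character fixup branch) by a single for loop over enumerate(cs) that XORs each character according to its index parity, so the trailing case disappears.
import Mathlib
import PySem

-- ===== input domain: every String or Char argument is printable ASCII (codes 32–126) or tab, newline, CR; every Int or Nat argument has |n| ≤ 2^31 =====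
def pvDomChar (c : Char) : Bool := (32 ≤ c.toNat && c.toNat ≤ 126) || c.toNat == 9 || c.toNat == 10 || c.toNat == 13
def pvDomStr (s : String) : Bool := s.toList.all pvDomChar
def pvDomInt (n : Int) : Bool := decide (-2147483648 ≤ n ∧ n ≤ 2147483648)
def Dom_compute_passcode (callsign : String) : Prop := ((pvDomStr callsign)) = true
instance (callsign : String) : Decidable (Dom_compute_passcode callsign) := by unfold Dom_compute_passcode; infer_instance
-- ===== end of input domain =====

-- B replaces A's pair-stepping while loop (with a trailing-odd-character branch) by one
-- parity-branched pass over enumerate(cs); same O(n) cost, no speed claim.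


-- ===== PORT A =====
def pyOrd (c : Char) : Int := (c.toNat : Int)

-- A's while loop over indices i, i+1 stepping by 2, as the obvious two-at-a-time
-- structural recursion; the singleton case is A's trailing `if i < len(cs)` branch.
def computeLoopA : List Char → Int → Int
  | a :: b :: rest, code =>
      computeLoopA rest (PySem.Int.bxor code (PySem.Int.bor (pyOrd a <<< (8:Nat)) (pyOrd b)))
  | [a], code => PySem.Int.bxor code (pyOrd a <<< (8:Nat))
  | [], code => code

def compute_passcode (callsign : String) : Int :=
  -- str.split always returns a nonempty list, so Python's `[0]` never raises; `.headD ""` is exact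
  let cs := ((PySem.Str.split? (PySem.Str.upper callsign) "-").getD []).headD ""
  PySem.Int.band (computeLoopA cs.toList 0x73E2) 0x7FFF

-- ===== PORT B =====
def computeStepB (code : Int) (p : Int × Char) : Int :=
  if PySem.Int.mod p.1 2 == 0 then PySem.Int.bxor code (pyOrd p.2 <<< (8:Nat))
  else PySem.Int.bxor code (pyOrd p.2)

def compute_passcode_alt (callsign : String) : Int :=
  let cs := ((PySem.Str.split? (PySem.Str.upper callsign) "-").getD []).headD ""
  PySem.Int.band ((PySem.List.enumerate cs.toList 0).foldl computeStepB 0x73E2) 0x7FFF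

-- ===== PRECONDITION & SPEC =====
def Spec_compute_passcode (callsign : String) (out : Int) : Prop := out = compute_passcode_alt callsign
instance (callsign : String) (out : Int) : Decidable (Spec_compute_passcode callsign out) := by unfold Spec_compute_passcode; infer_instance

-- ===== CLAIM (what is proved, stated in full; the proofs are below) =====
def Claim_equal_compute_passcode : Prop := ∀ (callsign : String), Dom_compute_passcode callsign → Spec_compute_passcode callsign (compute_passcode callsign)

-- ===== LEMMAS AND PROOFS =====

lemma char_ofNat_toNat (n : Nat) : (Char.ofNat n).toNat = n ∨ (Char.ofNat n).toNat = 0 := by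
  unfold Char.ofNat
  split
  · left; rename_i h; simp [Char.ofNatAux, Char.toNat, UInt32.toNat_ofNatLT]
  · right; rfl

lemma upperChar_lt (c : Char) (h : c.toNat < 256) : (PySem.Chars.upperChar c).toNat < 256 := by
  unfold PySem.Chars.upperChar
  split
  · rcases char_ofNat_toNat (c.toNat - 32) with h1 | h1 <;> omega
  · exact h

-- every character of any piece produced by splitOn.go comes from the input, the pending
-- chunk, or an already-emitted piece
lemma mem_splitOn_go (sep : List Char) :
    ∀ (fuel : Nat) (l cur : List Char) (acc : List (List Char)) (p : List Char),
      p ∈ PySem.Chars.splitOn.go sep fuel l cur acc →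
      ∀ c ∈ p, c ∈ l ∨ c ∈ cur ∨ ∃ q ∈ acc, c ∈ q := by
  intro fuel
  induction fuel with
  | zero =>
      intro l cur acc p hp c hc
      simp only [PySem.Chars.splitOn.go, List.mem_reverse, List.mem_cons] at hp
      rcases hp with rfl | hp
      · rcases List.mem_append.mp hc with h1 | h1
        · exact Or.inr (Or.inl (List.mem_reverse.mp h1))
        · exact Or.inl h1
      · exact Or.inr (Or.inr ⟨p, hp, hc⟩)
  | succ fuel ih =>
      intro l cur acc p hp c hc
      cases l with
      | nil =>
          simp only [PySem.Chars.splitOn.go, List.mem_reverse, List.mem_cons] at hp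
          rcases hp with rfl | hp
          · exact Or.inr (Or.inl (List.mem_reverse.mp hc))
          · exact Or.inr (Or.inr ⟨p, hp, hc⟩)
      | cons a rest =>
          rw [PySem.Chars.splitOn.go] at hp
          by_cases hpre : sep.isPrefixOf (a :: rest) = true
          · rw [if_pos hpre] at hp
            rcases ih _ _ _ _ hp c hc with h1 | h1 | ⟨q, hq, hcq⟩
            · exact Or.inl (List.mem_of_mem_drop h1)
            · simp at h1
            · rcases List.mem_cons.mp hq with rfl | hq'
              · exact Or.inr (Or.inl (List.mem_reverse.mp hcq))
              · exact Or.inr (Or.inr ⟨q, hq', hcq⟩)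
          · rw [if_neg hpre] at hp
            rcases ih _ _ _ _ hp c hc with h1 | h1 | h1
            · exact Or.inl (List.mem_cons_of_mem _ h1)
            · rcases List.mem_cons.mp h1 with rfl | h2
              · exact Or.inl List.mem_cons_self
              · exact Or.inr (Or.inl h2)
            · exact Or.inr (Or.inr h1)

-- all characters of cs = callsign.upper().split("-")[0] are < 256 on the ASCII domain
lemma cs_chars (callsign : String) (hd : Dom_compute_passcode callsign) :
    ∀ c ∈ (((PySem.Str.split? (PySem.Str.upper callsign) "-").getD []).headD "").toList,
      c.toNat < 256 := by
  intro c hc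
  have hup : ∀ c' ∈ (PySem.Str.upper callsign).toList, c'.toNat < 256 := by
    intro c' hc'
    rw [PySem.Str.toList_upper] at hc'
    rcases List.mem_map.mp hc' with ⟨c₀, hc₀, rfl⟩
    have hdc : pvDomChar c₀ = true := by
      have := List.all_eq_true.mp hd c₀ hc₀
      exact this
    have : c₀.toNat < 256 := by
      simp only [pvDomChar, Bool.or_eq_true, Bool.and_eq_true, decide_eq_true_eq,
        beq_iff_eq] at hdc
      omega
    exact upperChar_lt c₀ this
  -- unfold the split down to Chars.splitOn
  rw [PySem.Str.split?] at hc
  have hsep : ("-" : String).toList = ['-'] := rfl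
  rw [hsep] at hc
  rw [PySem.Chars.split?] at hc
  simp only [List.isEmpty_cons, Bool.false_eq_true, if_false, Option.map_some, Option.getD_some] at hc
  cases hpieces : PySem.Chars.splitOn (PySem.Str.upper callsign).toList ['-'] with
  | nil =>
      rw [hpieces] at hc
      simp only [List.map_nil, List.headD_nil] at hc
      exact absurd (show c ∈ ([] : List Char) from hc) (List.not_mem_nil)
  | cons p ps =>
      rw [hpieces] at hc
      simp only [List.map_cons, List.headD_cons, String.toList_ofList] at hc
      have hp : p ∈ PySem.Chars.splitOn (PySem.Str.upper callsign).toList ['-'] := by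
        rw [hpieces]; exact List.mem_cons_self
      rw [PySem.Chars.splitOn] at hp
      rcases mem_splitOn_go ['-'] _ _ _ _ _ hp c hc with h1 | h1 | ⟨q, hq, _⟩
      · exact hup c h1
      · simp at h1
      · simp at hq

lemma nat_lor_eq_xor (m n : Nat) (h : n < 256) : (m <<< 8) ||| n = (m <<< 8) ^^^ n := by
  apply Nat.eq_of_testBit_eq
  intro i
  simp only [Nat.testBit_or, Nat.testBit_xor, Nat.testBit_shiftLeft]
  by_cases hi : 8 ≤ i
  · have h256 : (256 : Nat) ≤ 2 ^ i := by
      calc (256 : Nat) = 2 ^ 8 := by norm_num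
        _ ≤ 2 ^ i := Nat.pow_le_pow_right (by norm_num) hi
    have hn : n.testBit i = false := Nat.testBit_lt_two_pow (lt_of_lt_of_le h h256)
    simp [hn]
  · simp [hi]

lemma mod_two_natCast (k : Nat) : PySem.Int.mod ((k : Nat) : Int) 2 = ((k % 2 : Nat) : Int) := by
  exact_mod_cast PySem.Int.mod_natCast k 2

lemma shift8_cast (a : Char) : pyOrd a <<< (8:Nat) = ((a.toNat <<< 8 : Nat) : Int) :=
  (Int.natCast_shiftLeft a.toNat 8).symm

-- the per-character parity fold from an even start equals the pair-consuming loop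
lemma loop_eq : ∀ (n : Nat) (l : List Char), l.length ≤ n → (∀ c ∈ l, c.toNat < 256) →
    ∀ (m k : Nat), k % 2 = 0 →
      (PySem.List.enumerate l ((k : Nat) : Int)).foldl computeStepB ((m : Nat) : Int) =
        computeLoopA l ((m : Nat) : Int) := by
  intro n
  induction n with
  | zero =>
      intro l hl _ m k _
      have : l = [] := List.eq_nil_of_length_eq_zero (Nat.le_zero.mp hl)
      subst this
      simp [computeLoopA, PySem.List.enumerate]
  | succ n ih =>
      intro l hl hb m k hk
      match l with
      | [] => simp [computeLoopA, PySem.List.enumerate]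
      | [a] =>
          simp only [PySem.List.enumerate_cons, PySem.List.enumerate_nil, List.foldl_cons,
            List.foldl_nil, computeLoopA, computeStepB, mod_two_natCast, hk]
          simp
      | a :: b :: rest =>
          have hbn : b.toNat < 256 := hb b (by simp)
          -- unfold the two enumerate steps
          rw [PySem.List.enumerate_cons, PySem.List.enumerate_cons]
          simp only [List.foldl_cons]
          -- first step: even index
          have hstep1 : computeStepB ((m : Nat) : Int) (((k : Nat) : Int), a) =
              (((m ^^^ a.toNat <<< 8 : Nat)) : Int) := by
            simp only [computeStepB]
            rw [mod_two_natCast, hk]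
            simp only [pyOrd, Nat.cast_zero, beq_self_eq_true, if_true]
            rw [← Int.natCast_shiftLeft, PySem.Int.bxor_natCast]
          -- second step: odd index
          have hcast1 : (((k : Nat) : Int) + 1) = (((k + 1 : Nat)) : Int) := by push_cast; ring
          have hk1 : (k + 1) % 2 = 1 := by omega
          have hstep2 : computeStepB (((m ^^^ a.toNat <<< 8 : Nat)) : Int) ((((k : Nat) : Int)) + 1, b) =
              ((((m ^^^ a.toNat <<< 8) ^^^ b.toNat : Nat)) : Int) := by
            simp only [computeStepB, hcast1]
            rw [mod_two_natCast, hk1]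
            simp [pyOrd, PySem.Int.bxor_natCast]
          rw [hstep1, hstep2]
          have hcast2 : ((((k : Nat) : Int)) + 1 + 1) = (((k + 2 : Nat)) : Int) := by push_cast; ring
          rw [hcast2]
          have hrec := ih rest (by simp at hl; omega) (fun c hc => hb c (by simp [hc]))
            ((m ^^^ a.toNat <<< 8) ^^^ b.toNat) (k + 2) (by omega)
          rw [hrec]
          -- right-hand side: A's pair step
          show computeLoopA rest _ = computeLoopA (a :: b :: rest) _
          rw [computeLoopA]
          congr 1
          rw [shift8_cast]
          simp only [pyOrd, PySem.Int.bor_natCast, PySem.Int.bxor_natCast]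
          exact congrArg _ (by rw [nat_lor_eq_xor _ _ hbn]; exact Nat.xor_assoc m _ _)

-- ===== VERDICT (by name: the statement is the Claim_ definition above) =====
theorem compute_passcode_spec : Claim_equal_compute_passcode := by
  intro callsign hdom
  unfold Spec_compute_passcode compute_passcode compute_passcode_alt
  have hchars := cs_chars callsign hdom
  have h := loop_eq _ _ (le_refl (((PySem.Str.split? (PySem.Str.upper callsign) "-").getD []).headD "").toList.length) hchars 0x73E2 0 rfl
  rw [Nat.cast_zero] at h
  rw [show (((0x73E2:Nat):Int)) = (0x73E2:Int) from by norm_num] at h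
  dsimp only
  rw [h]
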